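-- pv_equiv track=rewrite | github.com/grtninja/skill-arbiter | skill-candidates/skill-installer-plus/scripts/skill_installer_plus.py | manual_score
-- ===== SOURCE A (Python) =====
-- from typing import Any
--
-- MANUAL_EVENT_WEIGHTS = {
--     "success": 4,
--     "warn": -5,
--     "failure": -10,
--     "disabled": -16,
--     "quarantined": -18,
--     "restored": 8,
-- }
--
-- def manual_score(profile: dict[str, Any]) -> int:
--     events = profile.get("manual_events")
--     if not isinstance(events, dict):
--         return 0
--     score = 0
--     for key, count in events.items():
--         try:
--             value = int(count)
--         except (TypeError, ValueError):
--             continue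
--         score += MANUAL_EVENT_WEIGHTS.get(str(key), 0) * value
--     return score
-- ===== SOURCE B (Python) =====
-- from typing import Any
--
-- MANUAL_EVENT_WEIGHTS = {
--     "success": 4,
--     "warn": -5,
--     "failure": -10,
--     "disabled": -16,
--     "quarantined": -18,
--     "restored": 8,
-- }
--
-- def manual_score(profile: dict[str, Any]) -> int:
--     events = profile.get("manual_events")
--     if not isinstance(events, dict):
--         return 0
--     score = 0
--     for key, weight in MANUAL_EVENT_WEIGHTS.items():
--         value = events.get(key)
--         if value is None:
--             continue
--         try:
--             value = int(value)
--         except (TypeError, ValueError):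
--             continue
--         score += weight * value
--     return score
-- ===== Notes on version B (the rewrite author's own statement) =====
-- stated objective: alternative
-- what changed: B inverts the traversal: instead of scanning every event and looking its weight up in the table, it walks the fixed six-entry weight table and looks each weighted key up in the events dict, so unweighted events are never touched.
import Mathlib
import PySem

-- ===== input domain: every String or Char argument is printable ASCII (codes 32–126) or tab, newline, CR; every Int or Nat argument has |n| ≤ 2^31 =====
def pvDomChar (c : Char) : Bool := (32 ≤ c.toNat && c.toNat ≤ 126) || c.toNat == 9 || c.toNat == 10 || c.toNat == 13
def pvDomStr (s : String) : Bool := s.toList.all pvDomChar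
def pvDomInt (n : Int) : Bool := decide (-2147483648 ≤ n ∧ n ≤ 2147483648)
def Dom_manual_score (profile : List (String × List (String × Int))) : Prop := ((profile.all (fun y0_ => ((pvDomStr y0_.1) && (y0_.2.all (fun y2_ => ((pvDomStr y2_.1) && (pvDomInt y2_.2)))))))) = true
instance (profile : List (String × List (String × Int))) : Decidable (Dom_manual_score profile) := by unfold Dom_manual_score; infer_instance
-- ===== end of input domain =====

-- B walks the fixed six-entry weight table and looks each key up in the events dict,
-- instead of scanning every event and looking its weight up (objective: alternative).


-- ===== PORT A =====
-- MANUAL_EVENT_WEIGHTS (module constant, used by both programs)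
def pvWeights : List (String × Int) :=
  [("success", 4), ("warn", -5), ("failure", -10),
   ("disabled", -16), ("quarantined", -18), ("restored", 8)]

-- A: events = profile.get("manual_events"); missing key → not a dict → 0 (under the
-- declared type every present value IS a dict, so isinstance only fails on None).
-- int(count) always succeeds on an int, so the try/except never fires; str(key) = key.
def manual_score (profile : List (String × List (String × Int))) : Int :=
  match profile.lookup "manual_events" with
  | none => 0
  | some events =>
      events.foldl (fun score kv => score + ((pvWeights.lookup kv.1).getD 0) * kv.2) 0

-- ===== PORT B =====
-- B's loop over MANUAL_EVENT_WEIGHTS.items(): value = events.get(key); None → skip;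
-- int(value) always succeeds on an int.
def altGo : List (String × Int) → List (String × Int) → Int → Int
  | [], _, score => score
  | (k, w) :: rest, events, score =>
      match events.lookup k with
      | none => altGo rest events score
      | some v => altGo rest events (score + w * v)

def manual_score_alt (profile : List (String × List (String × Int))) : Int :=
  match profile.lookup "manual_events" with
  | none => 0
  | some events => altGo pvWeights events 0

-- ===== PRECONDITION & SPEC =====
-- Pre_ excludes association lists with duplicate keys (in the profile or in its
-- manual_events value): a real Python dict cannot contain them, and which duplicate a
-- first-match assoc-list lookup sees is an artefact of the representation.
def Pre_manual_score (profile : List (String × List (String × Int))) : Prop :=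
  (profile.map Prod.fst).Nodup ∧ ∀ p ∈ profile, (p.2.map Prod.fst).Nodup
instance (profile : List (String × List (String × Int))) : Decidable (Pre_manual_score profile) := by unfold Pre_manual_score; infer_instance

def pvWitness_manual_score : (List (String × List (String × Int))) :=
  [("manual_events", [("success", 2), ("bogus", 7), ("warn", 1)])]

def Spec_manual_score (profile : List (String × List (String × Int))) (out : Int) : Prop := out = manual_score_alt profile
instance (profile : List (String × List (String × Int))) (out : Int) : Decidable (Spec_manual_score profile out) := by unfold Spec_manual_score; infer_instance

-- ===== CLAIM (what is proved, stated in full; the proofs are below) =====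
def Claim_equal_manual_score : Prop := ∀ (profile : List (String × List (String × Int))), Dom_manual_score profile → Pre_manual_score profile → Spec_manual_score profile (manual_score profile)

-- ===== LEMMAS AND PROOFS =====

theorem lookup_cons_if {β : Type} (k k' : String) (v : β) (l : List (String × β)) :
    ((k', v) :: l).lookup k = if k = k' then some v else l.lookup k := by
  rw [List.lookup_cons]
  by_cases h : k = k'
  · simp [h]
  · simp [beq_eq_false_iff_ne.2 h, h]

theorem lookup_eq_none_of_not_mem {β : Type} (k : String) (l : List (String × β))
    (h : k ∉ l.map Prod.fst) : l.lookup k = none := by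
  rw [List.lookup_eq_none_iff]
  intro p hp
  simp only [bne_iff_ne, ne_eq]
  exact fun hk => h (List.mem_map.2 ⟨p, hp, hk.symm⟩)

theorem altGo_nil (ws : List (String × Int)) (acc : Int) : altGo ws [] acc = acc := by
  induction ws with
  | nil => rfl
  | cons p rest ih => cases p; simp [altGo, ih]

theorem altGo_shift (ws events : List (String × Int)) (acc c : Int) :
    altGo ws events (acc + c) = altGo ws events acc + c := by
  induction ws generalizing acc with
  | nil => rfl
  | cons p rest ih =>
      obtain ⟨k, w⟩ := p
      cases hev : events.lookup k with
      | none => simp only [altGo, hev]; exact ih acc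
      | some v =>
          simp only [altGo, hev]
          rw [show acc + c + w * v = acc + w * v + c by ring, ih (acc + w * v)]

theorem altGo_irrel (ws : List (String × Int)) (k : String) (v : Int)
    (events : List (String × Int)) (acc : Int) (h : k ∉ ws.map Prod.fst) :
    altGo ws ((k, v) :: events) acc = altGo ws events acc := by
  induction ws generalizing acc with
  | nil => rfl
  | cons p rest ih =>
      obtain ⟨k', w'⟩ := p
      simp only [List.map_cons, List.mem_cons, not_or] at h
      have hne : ¬k' = k := fun he => h.1 he.symm
      cases hev : events.lookup k' with
      | none => simp only [altGo, lookup_cons_if, if_neg hne, hev]; exact ih acc h.2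
      | some v' => simp only [altGo, lookup_cons_if, if_neg hne, hev]; exact ih _ h.2

theorem altGo_cons (ws : List (String × Int)) (events : List (String × Int))
    (k : String) (v : Int) (acc : Int)
    (hnd : (ws.map Prod.fst).Nodup) (hk : events.lookup k = none) :
    altGo ws ((k, v) :: events) acc = altGo ws events acc + ((ws.lookup k).getD 0) * v := by
  induction ws generalizing acc with
  | nil => simp [altGo]
  | cons p rest ih =>
      obtain ⟨k', w'⟩ := p
      simp only [List.map_cons, List.nodup_cons] at hnd
      by_cases he : k' = k
      · subst he
        simp only [altGo, lookup_cons_if, if_true, hk, Option.getD_some]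
        rw [altGo_irrel rest k' v events _ hnd.1, altGo_shift]
      · have hne : ¬k = k' := fun hkk => he hkk.symm
        cases hle : events.lookup k' with
        | none =>
            simp only [altGo, lookup_cons_if, if_neg he, if_neg hne, hle]
            exact ih acc hnd.2
        | some v' =>
            simp only [altGo, lookup_cons_if, if_neg he, if_neg hne, hle]
            exact ih (acc + w' * v') hnd.2

theorem main_go (events : List (String × Int)) (acc : Int)
    (hnd : (events.map Prod.fst).Nodup) :
    events.foldl (fun score kv => score + ((pvWeights.lookup kv.1).getD 0) * kv.2) acc
      = altGo pvWeights events acc := by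
  induction events generalizing acc with
  | nil => rw [altGo_nil]; rfl
  | cons p rest ih =>
      obtain ⟨k, v⟩ := p
      simp only [List.map_cons, List.nodup_cons] at hnd
      rw [List.foldl_cons, ih _ hnd.2,
          altGo_cons pvWeights rest k v acc (by decide) (lookup_eq_none_of_not_mem k rest hnd.1),
          altGo_shift]

-- ===== VERDICT (by name: the statement is the Claim_ definition above) =====
theorem manual_score_spec : Claim_equal_manual_score := by
  intro profile _ hpre
  unfold Spec_manual_score manual_score manual_score_alt
  cases hev : profile.lookup "manual_events" with
  | none => rfl
  | some events =>
      have hmem : ("manual_events", events) ∈ profile := by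
        obtain ⟨l1, l2, hl, -⟩ := List.lookup_eq_some_iff.1 hev
        rw [hl]; exact List.mem_append.2 (Or.inr (List.mem_cons_self))
      exact main_go events 0 (hpre.2 _ hmem)
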